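-- pv_equiv track=rewrite | github.com/hjhooon/RPLab_DL | HW1/HW1-ex4.py | subsequences
-- ===== SOURCE A (Python) =====
-- from itertools import combinations
--
-- def subsequences(a,n):
--     a = list(a)
--     new_a = []
--     t1 = ()
--     for i in a:
--         new_a += str(i)
--
--     b = list(combinations(new_a,n))
--     for j in b:
--         c=""
--         for k in range(n):
--             c = c + j[k]
--         t2 = (c,)
--         t1 += t2
--     return t1
-- ===== SOURCE B (Python) =====
-- def subsequences(a, n):
--     a = list(a)
--     new_a = []
--     for i in a:
--         new_a += str(i)
--     if n < 0:
--         raise ValueError("n must be non-negative")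
--
--     def go(i, r):
--         # all r-length subsequences of new_a[i:], as joined strings,
--         # enumerated by choice of the first selected index k
--         if r == 0:
--             return [""]
--         res = []
--         for k in range(i, len(new_a) - r + 1):
--             ch = new_a[k]
--             for tail in go(k + 1, r - 1):
--                 res.append(ch + tail)
--         return res
--
--     return tuple(go(0, n))
-- ===== Notes on version B (the rewrite author's own statement) =====
-- stated objective: alternative
-- what changed: Instead of materialising all index combinations with itertools.combinations and then joining each tuple in a second pass, B enumerates the subsequences directly by a recursion on the position of the first selected character, building each output string as it goes (same lexicographic-by-position order).
import Mathlib
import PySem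

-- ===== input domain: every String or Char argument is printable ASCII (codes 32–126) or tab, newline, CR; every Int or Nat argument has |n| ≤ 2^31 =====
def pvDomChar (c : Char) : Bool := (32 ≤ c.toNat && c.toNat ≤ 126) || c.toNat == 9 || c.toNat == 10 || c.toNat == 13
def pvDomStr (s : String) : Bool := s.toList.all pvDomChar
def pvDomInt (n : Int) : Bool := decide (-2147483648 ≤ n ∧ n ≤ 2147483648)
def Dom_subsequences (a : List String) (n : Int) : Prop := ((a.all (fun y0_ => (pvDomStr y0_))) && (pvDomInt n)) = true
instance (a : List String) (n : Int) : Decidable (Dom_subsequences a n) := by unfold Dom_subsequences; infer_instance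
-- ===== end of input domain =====

-- B enumerates subsequences by recursion on the first chosen index instead of
-- materialising itertools.combinations and joining in a second pass (alternative decomposition, same cost).

-- ===== PORT A =====
-- itertools.combinations(xs, k) in itertools' lexicographic-by-position order,
-- ported by hand (include the head first, then skip it) — exact for this use.
def combA : Nat → List Char → List (List Char)
  | 0, _ => [[]]
  | _ + 1, [] => []
  | k + 1, x :: xs =>
    -- itertools.combinations returns an empty iterator at once when r > len(pool)
    if xs.length + 1 < k + 1 then []
    else (combA k xs).map (fun j => x :: j) ++ combA (k + 1) xs

-- literal port of A; j[k] is always in range (each j has length n), so pyGetD is exact here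
def subsequences (a : List String) (n : Int) : List String :=
  let new_a : List Char := a.foldl (fun acc s => acc ++ s.toList) []
  let b := combA n.toNat new_a
  b.foldl (fun t1 j =>
    t1 ++ [(PySem.List.pyRange 0 n 1).foldl (fun c k => c.push (PySem.List.pyGetD j k ' ')) ""]) []

-- ===== PORT B =====
-- go(i, r): all r-length subsequences of new_a[i:], joined, by choice of first index k;
-- cs[k] is always in range on the iterated k, so pyGetD is exact here
def goB (cs : List Char) : Nat → Int → List String
  | 0, _ => [""]
  | r + 1, i =>
    (PySem.List.pyRange i ((cs.length : Int) - r) 1).foldl (fun res k =>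
      (goB cs r (k + 1)).foldl (fun res tail =>
        res ++ [String.singleton (PySem.List.pyGetD cs k ' ') ++ tail]) res) []

def subsequences_alt (a : List String) (n : Int) : List String :=
  let new_a : List Char := a.foldl (fun acc s => acc ++ s.toList) []
  goB new_a n.toNat 0

-- ===== PRECONDITION & SPEC =====
-- Pre_ excludes n < 0, where Python A raises ValueError (combinations' r must be non-negative).
def Pre_subsequences (a : List String) (n : Int) : Prop := 0 ≤ n
instance (a : List String) (n : Int) : Decidable (Pre_subsequences a n) := by
  unfold Pre_subsequences; infer_instance

def pvWitness_subsequences : List String × Int := (["ab", "c"], 2)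

def Spec_subsequences (a : List String) (n : Int) (out : List String) : Prop := out = subsequences_alt a n
instance (a : List String) (n : Int) (out : List String) : Decidable (Spec_subsequences a n out) := by unfold Spec_subsequences; infer_instance

-- ===== CLAIM (what is proved, stated in full; the proofs are below) =====
def Claim_equal_subsequences : Prop := ∀ (a : List String) (n : Int), Dom_subsequences a n → Pre_subsequences a n → Spec_subsequences a n (subsequences a n)

-- ===== LEMMAS AND PROOFS =====

theorem combA_eq_nil_of_short : ∀ (cs : List Char) (k : Nat), cs.length < k → combA k cs = [] := by
  intro cs k h
  cases k with
  | zero => omega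
  | succ k =>
    cases cs with
    | nil => rfl
    | cons c rest =>
      simp only [combA]
      rw [if_pos (by simpa using h)]

theorem length_of_mem_combA : ∀ (k : Nat) (cs : List Char) (j : List Char),
    j ∈ combA k cs → j.length = k := by
  intro k
  induction k with
  | zero => intro cs j h; simp [combA] at h; simp [h]
  | succ k ih =>
    intro cs j h
    induction cs with
    | nil => simp [combA] at h
    | cons c rest ihc =>
      simp only [combA] at h
      by_cases hg : rest.length + 1 < k + 1
      · rw [if_pos hg] at h; simp at h
      · rw [if_neg hg] at h
        simp at h
        rcases h with ⟨j', hj', rfl⟩ | h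
        · simp [ih rest j' hj']
        · exact ihc h

-- pushing chars one by one onto a string is appending the char list
theorem foldl_push_eq (j : List Char) : ∀ (pre : String),
    j.foldl String.push pre = pre ++ String.ofList j := by
  induction j with
  | nil => intro pre; simp
  | cons c js ih =>
    intro pre
    have h : pre.push c ++ String.ofList js = pre ++ String.ofList (c :: js) := by
      apply String.ext; simp
    simp only [List.foldl_cons, ih (pre.push c), h]

-- the body of goB's outer loop, as "accumulator ++ contribution"
theorem goB_succ (cs : List Char) (r : Nat) (i : Int) :
    goB cs (r + 1) i
      = (PySem.List.pyRange i ((cs.length : Int) - r) 1).flatMap (fun k =>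
          (goB cs r (k + 1)).map (fun tail =>
            String.singleton (PySem.List.pyGetD cs k ' ') ++ tail)) := by
  have hfun : (fun (res : List String) (k : Int) =>
        (goB cs r (k + 1)).foldl (fun res tail =>
          res ++ [String.singleton (PySem.List.pyGetD cs k ' ') ++ tail]) res)
      = fun res k => res ++ (goB cs r (k + 1)).map (fun tail =>
          String.singleton (PySem.List.pyGetD cs k ' ') ++ tail) := by
    funext res k
    exact PySem.List.foldl_append_singleton_eq_map _ _ _
  show (PySem.List.pyRange i ((cs.length : Int) - r) 1).foldl _ [] = _
  rw [hfun, PySem.List.foldl_append_eq_flatMap]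
  simp

theorem goB_eq : ∀ (r : Nat) (cs : List Char) (i : Nat),
    goB cs r (i : Int) = (combA r (cs.drop i)).map String.ofList := by
  intro r
  induction r with
  | zero => intro cs i; simp [goB, combA]
  | succ r ih =>
    intro cs i
    have hstep : ∀ (d i : Nat), cs.length - r - i ≤ d →
        goB cs (r + 1) (i : Int) = (combA (r + 1) (cs.drop i)).map String.ofList := by
      intro d
      induction d with
      | zero =>
        intro i hd
        rw [combA_eq_nil_of_short (cs.drop i) (r + 1) (by simp; omega)]
        rw [goB_succ, PySem.List.pyRange_one_eq_nil (by omega)]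
        rfl
      | succ d ihd =>
        intro i hd
        by_cases hi : i < cs.length - r
        · have hilen : i < cs.length := by omega
          have hdrop : cs.drop i = cs[i] :: cs.drop (i + 1) :=
            List.drop_eq_getElem_cons hilen
          have hget : PySem.List.pyGetD cs (i : Int) ' ' = cs[i] := by
            rw [PySem.List.pyGetD_natCast]
            exact List.getD_eq_getElem cs ' ' hilen
          have hcast : ((i : Int) + 1) = ((i + 1 : Nat) : Int) := by push_cast; ring
          rw [goB_succ, PySem.List.pyRange_one_cons (by omega),
              List.flatMap_cons, ← goB_succ, hcast, ih cs (i + 1),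
              ihd (i + 1) (by omega), hdrop]
          have hg : ¬ ((cs.drop (i + 1)).length + 1 < r + 1) := by simp only [List.length_drop]; omega
          simp only [combA]
          rw [if_neg hg]
          simp only [List.map_append, List.map_map, hget]
          congr 1
          apply List.map_congr_left
          intro j hj
          show String.singleton cs[i] ++ String.ofList j = String.ofList (cs[i] :: j)
          apply String.ext; simp
        · rw [combA_eq_nil_of_short (cs.drop i) (r + 1) (by simp; omega)]
          rw [goB_succ, PySem.List.pyRange_one_eq_nil (by omega)]
          rfl
    exact hstep (cs.length - r - i) i (le_refl _)

-- ===== VERDICT (by name: the statement is the Claim_ definition above) =====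
theorem subsequences_spec : Claim_equal_subsequences := by
  intro a n _ hpre
  have hn0 : 0 ≤ n := hpre
  unfold Spec_subsequences subsequences subsequences_alt
  simp only []
  set new_a : List Char := a.foldl (fun acc s => acc ++ s.toList) [] with hna
  have hB : goB new_a n.toNat 0 = (combA n.toNat new_a).map String.ofList := by
    have h := goB_eq n.toNat new_a 0
    simpa using h
  rw [PySem.List.foldl_append_singleton_eq_map, hB]
  simp only [List.nil_append]
  apply List.map_congr_left
  intro j hj
  have hlen : j.length = n.toNat := length_of_mem_combA n.toNat new_a j hj
  have hn : ((j.length : Int)) = n := by rw [hlen]; omega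
  rw [← hn, PySem.List.foldl_pyRange_pyGetD' j ' ' String.push "" (by norm_num : (0:Int) ≤ 0)]
  simp [foldl_push_eq]
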